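-- pv_equiv track=rewrite | github.com/adit4298/Trace_Trail | ai_module/models/feature_extractor.py | _count_by_platform
-- ===== SOURCE A (Python) =====
-- from typing import Dict, Any, List
--
-- def _count_by_platform(connections: List[Dict[str, Any]]) -> Dict[str, int]:
--     """Count connections by platform."""
--     platforms = ['facebook', 'instagram', 'twitter', 'linkedin']
--     counts = {platform: 0 for platform in platforms}
--     for conn in connections:
--         platform = conn.get('platform', '').lower()
--         if platform in platforms:
--             counts[platform] += 1
--     return counts
-- ===== SOURCE B (Python) =====
-- from typing import Dict, Any, List
--
-- def _count_by_platform(connections: List[Dict[str, Any]]) -> Dict[str, int]: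
--     """Count connections by platform: one counting scan per known platform."""
--     return {p: sum(1 for conn in connections
--                    if conn.get('platform', '').lower() == p)
--             for p in ['facebook', 'instagram', 'twitter', 'linkedin']}
-- ===== Notes on version B (the rewrite author's own statement) =====
-- stated objective: alternative
-- what changed: Inverted the loop nesting: instead of one pass over connections maintaining a shared counts dict, B scans the connection list once per platform, building each (platform, count) entry independently.
import Mathlib
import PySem

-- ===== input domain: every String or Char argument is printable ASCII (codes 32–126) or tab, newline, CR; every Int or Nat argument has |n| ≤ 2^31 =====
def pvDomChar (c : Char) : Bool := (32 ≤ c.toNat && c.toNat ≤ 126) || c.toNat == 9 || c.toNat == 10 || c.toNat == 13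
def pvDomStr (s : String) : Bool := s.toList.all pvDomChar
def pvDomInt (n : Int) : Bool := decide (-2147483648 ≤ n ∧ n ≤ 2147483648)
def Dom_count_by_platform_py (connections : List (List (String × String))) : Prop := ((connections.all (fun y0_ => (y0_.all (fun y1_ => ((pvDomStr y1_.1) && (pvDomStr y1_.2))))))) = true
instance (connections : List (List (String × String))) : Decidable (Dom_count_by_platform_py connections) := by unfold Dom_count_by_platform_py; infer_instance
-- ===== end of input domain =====

-- B differs by inverting the loop nesting: one counting scan of the connections per platform
-- instead of one pass maintaining a shared counts dict (alternative decomposition, same result).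

-- ===== PORT A =====
def pvPlatforms : List String := ["facebook", "instagram", "twitter", "linkedin"]

def count_by_platform_py (connections : List (List (String × String))) : List (String × Int) :=
  (connections.foldl
    (fun counts conn =>
      let platform := PySem.Str.lower ((PySem.Dict.mk conn).getD "platform" "")
      if platform ∈ pvPlatforms then counts.modify platform 0 (· + 1) else counts)
    (pvPlatforms.foldl (fun d p => d.insert p 0) PySem.Dict.empty)).items

-- ===== PORT B =====
def pvMatches (p : String) (conn : List (String × String)) : Bool :=
  PySem.Str.lower ((PySem.Dict.mk conn).getD "platform" "") == p

def count_by_platform_py_alt (connections : List (List (String × String))) : List (String × Int) :=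
  ["facebook", "instagram", "twitter", "linkedin"].map
    (fun p => (p, (connections.countP (pvMatches p) : Int)))

-- ===== PRECONDITION & SPEC =====
def Spec_count_by_platform_py (connections : List (List (String × String))) (out : List (String × Int)) : Prop := out = count_by_platform_py_alt connections
instance (connections : List (List (String × String))) (out : List (String × Int)) : Decidable (Spec_count_by_platform_py connections out) := by unfold Spec_count_by_platform_py; infer_instance

-- ===== CLAIM (what is proved, stated in full; the proofs are below) =====
def Claim_equal_count_by_platform_py : Prop := ∀ (connections : List (List (String × String))), Dom_count_by_platform_py connections → Spec_count_by_platform_py connections (count_by_platform_py connections)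

-- ===== LEMMAS AND PROOFS =====

-- One step of A's loop on the four-key counts table.
theorem pv_step (q : String) (a b c d : Int) :
    (if q ∈ pvPlatforms
       then (PySem.Dict.mk [("facebook", a), ("instagram", b), ("twitter", c), ("linkedin", d)]).modify q 0 (· + 1)
       else PySem.Dict.mk [("facebook", a), ("instagram", b), ("twitter", c), ("linkedin", d)]) =
    PySem.Dict.mk [("facebook", if q == "facebook" then a + 1 else a),
                   ("instagram", if q == "instagram" then b + 1 else b),
                   ("twitter", if q == "twitter" then c + 1 else c),
                   ("linkedin", if q == "linkedin" then d + 1 else d)] := by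
  by_cases h1 : q = "facebook"
  · subst h1; simp [pvPlatforms, PySem.Dict.modify, PySem.Dict.contains, PySem.Dict.getD, PySem.Dict.get?, PySem.Dict.insert]
  by_cases h2 : q = "instagram"
  · subst h2; simp [pvPlatforms, PySem.Dict.modify, PySem.Dict.contains, PySem.Dict.getD, PySem.Dict.get?, PySem.Dict.insert]
  by_cases h3 : q = "twitter"
  · subst h3; simp [pvPlatforms, PySem.Dict.modify, PySem.Dict.contains, PySem.Dict.getD, PySem.Dict.get?, PySem.Dict.insert]
  by_cases h4 : q = "linkedin"
  · subst h4; simp [pvPlatforms, PySem.Dict.modify, PySem.Dict.contains, PySem.Dict.getD, PySem.Dict.get?, PySem.Dict.insert]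
  · simp [pvPlatforms, h1, h2, h3, h4]

-- A's loop, with the state generalized over the four current counters.
theorem pv_loop (conns : List (List (String × String))) (a b c d : Int) :
    conns.foldl
      (fun counts conn =>
        let platform := PySem.Str.lower ((PySem.Dict.mk conn).getD "platform" "")
        if platform ∈ pvPlatforms then counts.modify platform 0 (· + 1) else counts)
      (PySem.Dict.mk [("facebook", a), ("instagram", b), ("twitter", c), ("linkedin", d)]) =
    PySem.Dict.mk [("facebook", a + conns.countP (pvMatches "facebook")),
                   ("instagram", b + conns.countP (pvMatches "instagram")),
                   ("twitter", c + conns.countP (pvMatches "twitter")),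
                   ("linkedin", d + conns.countP (pvMatches "linkedin"))] := by
  induction conns generalizing a b c d with
  | nil => simp
  | cons conn rest ih =>
    simp only [List.foldl_cons]
    rw [pv_step, ih]
    have hmatch : ∀ p, pvMatches p conn = (PySem.Str.lower ((PySem.Dict.mk conn).getD "platform" "") == p) := by
      intro p; rfl
    simp only [PySem.Dict.mk.injEq, List.countP_cons, hmatch]
    simp only [List.cons.injEq, Prod.mk.injEq, true_and, and_true]
    and_intros <;> split <;> push_cast <;> ring

theorem count_by_platform_py_spec : Claim_equal_count_by_platform_py := by
  intro conns _
  show count_by_platform_py conns = count_by_platform_py_alt conns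
  unfold count_by_platform_py count_by_platform_py_alt
  show (conns.foldl
      (fun counts conn =>
        let platform := PySem.Str.lower ((PySem.Dict.mk conn).getD "platform" "")
        if platform ∈ pvPlatforms then counts.modify platform 0 (· + 1) else counts)
      (PySem.Dict.mk [("facebook", (0:Int)), ("instagram", 0), ("twitter", 0), ("linkedin", 0)])).items = _
  rw [pv_loop]
  simp
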